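-- pv_equiv track=rewrite | github.com/u-tokyo-gps-tanaka-lab/shogilib | research/rank.py | pt2comblist
-- ===== SOURCE A (Python) =====
-- from math import comb
--
-- def pt2comblist(canp, n_empty, allcount):
--     if n_empty < allcount:
--         return (0, [])
--     rank2comb = []
--     x = 0
--     for pb0 in range(allcount + 1 if canp else 1):
--         v0 = allcount - pb0
--         n_empty_1 = n_empty - pb0
--         for pb1 in range(v0 + 1 if canp else 1):
--             v1 = v0 - pb1
--             n_empty_2 = n_empty_1 - pb1
--             for b0 in range(v1 + 1):
--                 n_empty_3 = n_empty_2 - b0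
--                 b1 = v1 - b0
--                 xadd = comb(n_empty, pb0) * comb(n_empty_1, pb1) * comb(n_empty_2, b0) * comb(n_empty_3, b1)
--                 rank2comb.append((x, (pb0, pb1, b0, b1)))
--                 x += xadd
--     return x, rank2comb
-- ===== SOURCE B (Python) =====
-- from math import comb, factorial
--
-- def pt2comblist(canp, n_empty, allcount):
--     if n_empty < allcount:
--         return (0, [])
--     def comps(n, k):
--         if k == 1:
--             return [[n]]
--         return [[i] + rest for i in range(n + 1) for rest in comps(n - i, k - 1)]
--     base = comps(allcount, 4) if canp else [[0, 0] + t for t in comps(allcount, 2)]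
--     combos = [tuple(t) for t in base]
--     weights = [comb(n_empty, allcount) * (factorial(allcount)
--                // (factorial(a) * factorial(b) * factorial(c) * factorial(d)))
--                for (a, b, c, d) in combos]
--     total = 0
--     pairs = []
--     for combo, w in zip(combos, weights):
--         pairs.append((total, combo))
--         total += w
--     return total, pairs
-- ===== Notes on version B (the rewrite author's own statement) =====
-- stated objective: alternative
-- what changed: B replaces A's fixed triple-nested loop of telescoping math.comb products by a recursive k-ary composition generator comps(n,k) producing the placements as lists, and computes each weight by the closed-form multinomial comb(n_empty, allcount) * (allcount! // (a!*b!*c!*d!)) instead of A's running chain of comb calls on shrinking pools.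
import Mathlib
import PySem

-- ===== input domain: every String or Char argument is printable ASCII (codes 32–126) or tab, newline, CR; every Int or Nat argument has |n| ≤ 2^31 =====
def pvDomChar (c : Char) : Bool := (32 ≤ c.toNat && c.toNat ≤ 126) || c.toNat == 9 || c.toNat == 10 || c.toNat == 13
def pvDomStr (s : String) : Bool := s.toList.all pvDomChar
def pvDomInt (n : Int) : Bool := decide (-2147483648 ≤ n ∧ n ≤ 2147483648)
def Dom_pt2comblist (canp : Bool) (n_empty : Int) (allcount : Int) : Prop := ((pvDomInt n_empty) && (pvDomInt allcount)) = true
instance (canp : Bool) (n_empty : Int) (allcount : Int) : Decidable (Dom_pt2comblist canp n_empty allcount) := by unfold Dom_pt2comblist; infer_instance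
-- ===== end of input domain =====

-- B generates the placements with a recursive composition generator and weighs each by the
-- closed form comb(n_empty, allcount) * (allcount! // (a! b! c! d!)) instead of A's nested
-- loops of telescoping binomial products (objective: alternative algorithm, same cost).

-- ===== PORT A =====
-- math.comb: exact for 0 ≤ n, 0 ≤ k (the only arguments A ever passes; Python raises on negatives, never reached)
def pycomb (n k : Int) : Int := (n.toNat.choose k.toNat : Int)

def pt2comblist (canp : Bool) (n_empty : Int) (allcount : Int) : Int × (List (Int × (Int × Int × Int × Int))) :=
  if n_empty < allcount then (0, [])
  else
    (PySem.List.pyRange 0 (if canp then allcount + 1 else 1) 1).foldl (fun s pb0 =>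
      let v0 := allcount - pb0
      let n_empty_1 := n_empty - pb0
      (PySem.List.pyRange 0 (if canp then v0 + 1 else 1) 1).foldl (fun s pb1 =>
        let v1 := v0 - pb1
        let n_empty_2 := n_empty_1 - pb1
        (PySem.List.pyRange 0 (v1 + 1) 1).foldl (fun s b0 =>
          let n_empty_3 := n_empty_2 - b0
          let b1 := v1 - b0
          let xadd := pycomb n_empty pb0 * pycomb n_empty_1 pb1 * pycomb n_empty_2 b0 * pycomb n_empty_3 b1
          (s.1 + xadd, s.2 ++ [(s.1, (pb0, pb1, b0, b1))])) s) s) ((0 : Int), ([] : List (Int × (Int × Int × Int × Int))))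

-- ===== PORT B =====
-- math.factorial: exact for 0 ≤ n (the only arguments B ever passes)
def pyfact (n : Int) : Int := (n.toNat.factorial : Int)

-- comps(n, k) of Source B; k is the structural recursion depth (B calls it only with 4, 2, and the decrements)
def comps (n : Int) : Nat → List (List Int)
  | 0 => []            -- unreachable: Source B never calls comps with k < 1
  | 1 => [[n]]
  | (k+2) => (PySem.List.pyRange 0 (n + 1) 1).flatMap (fun i =>
      (comps (n - i) (k+1)).map (fun rest => [i] ++ rest))

-- tuple(t) for a length-4 list t
def toTup4 (l : List Int) : Int × Int × Int × Int := (l.getD 0 0, l.getD 1 0, l.getD 2 0, l.getD 3 0)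

def pt2comblist_alt (canp : Bool) (n_empty : Int) (allcount : Int) : Int × (List (Int × (Int × Int × Int × Int))) :=
  if n_empty < allcount then (0, [])
  else
    let base := if canp then comps allcount 4 else (comps allcount 2).map (fun t => [0, 0] ++ t)
    let combos := base.map toTup4
    let weights := combos.map (fun c =>
      pycomb n_empty allcount *
        PySem.Int.floordiv (pyfact allcount)
          (pyfact c.1 * pyfact c.2.1 * pyfact c.2.2.1 * pyfact c.2.2.2))
    let s := (combos.zip weights).foldl
      (fun (s : Int × List (Int × (Int × Int × Int × Int))) cw => (s.1 + cw.2, s.2 ++ [(s.1, cw.1)]))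
      ((0 : Int), ([] : List (Int × (Int × Int × Int × Int))))
    (s.1, s.2)

-- ===== PRECONDITION & SPEC =====
def Spec_pt2comblist (canp : Bool) (n_empty : Int) (allcount : Int) (out : Int × (List (Int × (Int × Int × Int × Int)))) : Prop := out = pt2comblist_alt canp n_empty allcount
instance (canp : Bool) (n_empty : Int) (allcount : Int) (out : Int × (List (Int × (Int × Int × Int × Int)))) : Decidable (Spec_pt2comblist canp n_empty allcount out) := by unfold Spec_pt2comblist; infer_instance

-- ===== CLAIM (what is proved, stated in full; the proofs are below) =====
def Claim_equal_pt2comblist : Prop := ∀ (canp : Bool) (n_empty : Int) (allcount : Int), Dom_pt2comblist canp n_empty allcount → Spec_pt2comblist canp n_empty allcount (pt2comblist canp n_empty allcount)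

-- ===== LEMMAS AND PROOFS =====

-- the combination list both programs enumerate, in A's loop order
def combosFlat (canp : Bool) (allcount : Int) : List (Int × Int × Int × Int) :=
  (PySem.List.pyRange 0 ((if canp then allcount else 0) + 1) 1).flatMap (fun a =>
    (PySem.List.pyRange 0 ((if canp then allcount - a else 0) + 1) 1).flatMap (fun b =>
      (PySem.List.pyRange 0 (allcount - a - b + 1) 1).map (fun c =>
        (a, b, c, allcount - a - b - c))))

def wA (n_empty : Int) (c : Int × Int × Int × Int) : Int :=
  pycomb n_empty c.1 * pycomb (n_empty - c.1) c.2.1 *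
    pycomb (n_empty - c.1 - c.2.1) c.2.2.1 * pycomb (n_empty - c.1 - c.2.1 - c.2.2.1) c.2.2.2

def wB (n_empty allcount : Int) (c : Int × Int × Int × Int) : Int :=
  pycomb n_empty allcount *
    PySem.Int.floordiv (pyfact allcount) (pyfact c.1 * pyfact c.2.1 * pyfact c.2.2.1 * pyfact c.2.2.2)

-- exclusive-prefix offsets paired with the items
def zipOff {α : Type} (f : α → Int) (x : Int) : List α → List (Int × α)
  | [] => []
  | c :: cs => (x, c) :: zipOff f (x + f c) cs

theorem foldlA_eq {α : Type} (f : α → Int) (cs : List α) : ∀ (x : Int) (acc : List (Int × α)),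
    cs.foldl (fun s c => (s.1 + f c, s.2 ++ [(s.1, c)])) (x, acc)
      = (x + (cs.map f).sum, acc ++ zipOff f x cs) := by
  induction cs with
  | nil => intro x acc; simp [zipOff]
  | cons c cs ih => intro x acc; simp [zipOff, ih, add_assoc]

theorem zipOff_congr {α : Type} (f g : α → Int) (cs : List α)
    (h : ∀ c ∈ cs, f c = g c) : ∀ x, zipOff f x cs = zipOff g x cs := by
  induction cs with
  | nil => intro x; simp [zipOff]
  | cons c cs ih =>
      intro x
      simp only [zipOff, h c (by simp)]
      rw [ih (fun c hc => h c (by simp [hc]))]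

theorem foldl_flatMap_eq {α β γ : Type} (g : α → List β) (step : γ → β → γ) (l : List α) :
    ∀ (init : γ), (l.flatMap g).foldl step init = l.foldl (fun s a => (g a).foldl step s) init := by
  induction l with
  | nil => intro init; simp
  | cons a l ih => intro init; simp [List.foldl_append, ih]

theorem hA_fold (canp : Bool) (n_empty allcount : Int) :
    (PySem.List.pyRange 0 (if canp then allcount + 1 else 1) 1).foldl (fun s pb0 =>
      let v0 := allcount - pb0
      let n_empty_1 := n_empty - pb0
      (PySem.List.pyRange 0 (if canp then v0 + 1 else 1) 1).foldl (fun s pb1 =>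
        let v1 := v0 - pb1
        let n_empty_2 := n_empty_1 - pb1
        (PySem.List.pyRange 0 (v1 + 1) 1).foldl (fun s b0 =>
          let n_empty_3 := n_empty_2 - b0
          let b1 := v1 - b0
          let xadd := pycomb n_empty pb0 * pycomb n_empty_1 pb1 * pycomb n_empty_2 b0 * pycomb n_empty_3 b1
          (s.1 + xadd, s.2 ++ [(s.1, (pb0, pb1, b0, b1))])) s) s)
      ((0 : Int), ([] : List (Int × (Int × Int × Int × Int))))
    = (combosFlat canp allcount).foldl
        (fun s c => (s.1 + wA n_empty c, s.2 ++ [(s.1, c)]))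
        ((0 : Int), ([] : List (Int × (Int × Int × Int × Int)))) := by
  cases canp <;>
    simp [combosFlat, foldl_flatMap_eq, List.foldl_map, wA, sub_sub]

-- B's generated combination list equals the flat list, canp = true
theorem comps4_map (n : Int) : (comps n 4).map toTup4 = combosFlat true n := by
  show (comps n (2+2)).map toTup4 = combosFlat true n
  simp only [comps, combosFlat, List.map_flatMap, List.map_map]
  simp [toTup4, Function.comp, sub_sub, ← List.map_eq_flatMap]

-- B's generated combination list equals the flat list, canp = false
theorem comps2_map (n : Int) :
    ((comps n 2).map (fun t => [0, 0] ++ t)).map toTup4 = combosFlat false n := by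
  show ((comps n (0+2)).map (fun t => [0, 0] ++ t)).map toTup4 = combosFlat false n
  simp only [comps, combosFlat, List.map_flatMap, List.map_map]
  have h01 : PySem.List.pyRange 0 1 1 = [0] := by decide
  simp [toTup4, Function.comp, h01, ← List.map_eq_flatMap]

theorem mem_combosFlat {canp : Bool} {n : Int} {c : Int × Int × Int × Int}
    (h : c ∈ combosFlat canp n) :
    0 ≤ c.1 ∧ 0 ≤ c.2.1 ∧ 0 ≤ c.2.2.1 ∧ 0 ≤ c.2.2.2 ∧ c.1 + c.2.1 + c.2.2.1 + c.2.2.2 = n := by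
  simp only [combosFlat, List.mem_flatMap, List.mem_map, PySem.List.mem_pyRange_one] at h
  obtain ⟨a, ha, b, hb, cc, hcc, rfl⟩ := h
  cases canp <;> simp_all

-- the multinomial identity behind the weight equality
theorem nat_multinomial (a b c d s : ℕ) :
    (a+(b+(c+(d+s)))).choose a * (b+(c+(d+s))).choose b * (c+(d+s)).choose c * (d+s).choose d
      * (a.factorial * b.factorial * c.factorial * d.factorial * s.factorial)
      = (a+(b+(c+(d+s)))).factorial := by
  have h1 : (a+(b+(c+(d+s)))).choose a * a.factorial * (b+(c+(d+s))).factorial = (a+(b+(c+(d+s)))).factorial := by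
    simpa using Nat.choose_mul_factorial_mul_factorial (Nat.le_add_right a (b+(c+(d+s))))
  have h2 : (b+(c+(d+s))).choose b * b.factorial * (c+(d+s)).factorial = (b+(c+(d+s))).factorial := by
    simpa using Nat.choose_mul_factorial_mul_factorial (Nat.le_add_right b (c+(d+s)))
  have h3 : (c+(d+s)).choose c * c.factorial * (d+s).factorial = (c+(d+s)).factorial := by
    simpa using Nat.choose_mul_factorial_mul_factorial (Nat.le_add_right c (d+s))
  have h4 : (d+s).choose d * d.factorial * s.factorial = (d+s).factorial := by
    simpa using Nat.choose_mul_factorial_mul_factorial (Nat.le_add_right d s)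
  rw [← h1, ← h2, ← h3, ← h4]; ring

theorem weight_eq (n_empty allcount : Int) (hle : allcount ≤ n_empty)
    (c : Int × Int × Int × Int)
    (h1 : 0 ≤ c.1) (h2 : 0 ≤ c.2.1) (h3 : 0 ≤ c.2.2.1) (h4 : 0 ≤ c.2.2.2)
    (hsum : c.1 + c.2.1 + c.2.2.1 + c.2.2.2 = allcount) :
    wA n_empty c = wB n_empty allcount c := by
  obtain ⟨a, b, cc, d⟩ := c
  simp only [wA, wB, pycomb, pyfact] at *
  set A := a.toNat with hA
  set B := b.toNat with hB
  set C := cc.toNat with hC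
  set D := d.toNat with hD
  set S := (n_empty - allcount).toNat with hS
  have hNe : n_empty.toNat = A + (B + (C + (D + S))) := by omega
  have hK : allcount.toNat = A + (B + (C + D)) := by omega
  have e1 : (n_empty - a).toNat = B + (C + (D + S)) := by omega
  have e2 : (n_empty - a - b).toNat = C + (D + S) := by omega
  have e3 : (n_empty - a - b - cc).toNat = D + S := by omega
  rw [hNe, hK, e1, e2, e3]
  have hprod : ((A.factorial : Int) * B.factorial * C.factorial * D.factorial)
      = ((A.factorial * B.factorial * C.factorial * D.factorial : ℕ) : Int) := by
    push_cast; ring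
  rw [hprod, PySem.Int.floordiv_natCast]
  -- small multinomial: allcount! / (A!B!C!D!) is the 4-part multinomial coefficient
  have hm : (A+(B+(C+D))).choose A * (B+(C+D)).choose B * (C+D).choose C
      * (A.factorial * B.factorial * C.factorial * D.factorial) = (A+(B+(C+D))).factorial := by
    have := nat_multinomial A B C D 0
    simpa using this
  have hdiv : (A+(B+(C+D))).factorial / (A.factorial * B.factorial * C.factorial * D.factorial)
      = (A+(B+(C+D))).choose A * (B+(C+D)).choose B * (C+D).choose C := by
    rw [← hm]
    exact Nat.mul_div_cancel _ (by positivity)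
  rw [hdiv]
  -- now a pure Nat identity, proved by multiplying through by the factorial denominator
  have key : (A+(B+(C+(D+S)))).choose (A+(B+(C+D))) *
      ((A+(B+(C+D))).choose A * (B+(C+D)).choose B * (C+D).choose C)
      = (A+(B+(C+(D+S)))).choose A * (B+(C+(D+S))).choose B * (C+(D+S)).choose C * (D+S).choose D := by
    apply Nat.eq_of_mul_eq_mul_right
      (show 0 < A.factorial * B.factorial * C.factorial * D.factorial * S.factorial by positivity)
    have hNK : A+(B+(C+(D+S))) = (A+(B+(C+D))) + S := by ring
    have hcf : (A+(B+(C+(D+S)))).choose (A+(B+(C+D))) * (A+(B+(C+D))).factorial * S.factorial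
        = (A+(B+(C+(D+S)))).factorial := by
      rw [hNK]
      simpa using Nat.choose_mul_factorial_mul_factorial (Nat.le_add_right (A+(B+(C+D))) S)
    calc (A+(B+(C+(D+S)))).choose (A+(B+(C+D))) *
          ((A+(B+(C+D))).choose A * (B+(C+D)).choose B * (C+D).choose C)
          * (A.factorial * B.factorial * C.factorial * D.factorial * S.factorial)
        = (A+(B+(C+(D+S)))).choose (A+(B+(C+D))) *
          ((A+(B+(C+D))).choose A * (B+(C+D)).choose B * (C+D).choose C
            * (A.factorial * B.factorial * C.factorial * D.factorial)) * S.factorial := by ring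
      _ = (A+(B+(C+(D+S)))).choose (A+(B+(C+D))) * (A+(B+(C+D))).factorial * S.factorial := by rw [hm]
      _ = (A+(B+(C+(D+S)))).factorial := hcf
      _ = (A+(B+(C+(D+S)))).choose A * (B+(C+(D+S))).choose B * (C+(D+S)).choose C * (D+S).choose D
            * (A.factorial * B.factorial * C.factorial * D.factorial * S.factorial) := (nat_multinomial A B C D S).symm
  exact_mod_cast key.symm

-- ===== VERDICT (by name: the statement is the Claim_ definition above) =====
theorem pt2comblist_spec : Claim_equal_pt2comblist := by
  intro canp n_empty allcount _
  unfold Spec_pt2comblist pt2comblist pt2comblist_alt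
  by_cases h : n_empty < allcount
  · simp [h]
  · simp only [h, if_false]
    rw [hA_fold, foldlA_eq]
    have hcombos : (if canp then comps allcount 4
        else (comps allcount 2).map (fun t => [0, 0] ++ t)).map toTup4 = combosFlat canp allcount := by
      cases canp
      · simpa [Function.comp_def] using comps2_map allcount
      · simpa using comps4_map allcount
    have hzip : ∀ (l : List (Int × Int × Int × Int)) (f : (Int × Int × Int × Int) → Int),
        l.zip (l.map f) = l.map (fun x => (x, f x)) := by
      intro l f
      exact (List.map_prod_left_eq_zip (f := f) (l := l)).symm
    simp only [hcombos, hzip, List.foldl_map]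
    rw [foldlA_eq]
    have hle : allcount ≤ n_empty := by omega
    have hw : ∀ x ∈ combosFlat canp allcount,
        wA n_empty x = wB n_empty allcount x := by
      intro x hx
      obtain ⟨p1, p2, p3, p4, p5⟩ := mem_combosFlat hx
      exact weight_eq n_empty allcount hle x p1 p2 p3 p4 p5
    simp only [List.map_congr_left hw, zipOff_congr _ _ _ hw]
    rfl
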